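-- pv_equiv track=rewrite | github.com/hitomi1/usp | 2024.2/aaa-scc0218/guloso2/e2.py | max_custo
-- ===== SOURCE A (Python) =====
-- def max_custo(tarefas):
--     # Ordenar as tarefas pelo tempo limite (d)
--     tarefas.sort(key=lambda x: x[1])
--
--     # Inicialização das variáveis
--     tempo_atual = 0
--     custo_total = 0
--
--     # Processar cada tarefa
--     for t, d in tarefas:
--         tempo_atual += t
--         custo_total += d - tempo_atual
--
--     return custo_total
-- ===== SOURCE B (Python) =====
-- def max_custo(tarefas):
--     # Same in-place sort by deadline as A (argument mutation preserved).
--     tarefas.sort(key=lambda x: x[1])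
--     n = len(tarefas)
--     # Total of deadlines minus position-weighted total of times:
--     # task i's time counts in every later (and its own) cumulative sum, i.e. (n - i) times.
--     return sum(d for _, d in tarefas) - sum((n - i) * t for i, (t, _) in enumerate(tarefas))
-- ===== Notes on version B (the rewrite author's own statement) =====
-- stated objective: alternative
-- what changed: Replaces the running cumulative-time accumulator loop with two independent sums: total deadlines minus the position-weighted total of times, (n-i)*t for the i-th task after the same in-place sort.
import Mathlib
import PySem

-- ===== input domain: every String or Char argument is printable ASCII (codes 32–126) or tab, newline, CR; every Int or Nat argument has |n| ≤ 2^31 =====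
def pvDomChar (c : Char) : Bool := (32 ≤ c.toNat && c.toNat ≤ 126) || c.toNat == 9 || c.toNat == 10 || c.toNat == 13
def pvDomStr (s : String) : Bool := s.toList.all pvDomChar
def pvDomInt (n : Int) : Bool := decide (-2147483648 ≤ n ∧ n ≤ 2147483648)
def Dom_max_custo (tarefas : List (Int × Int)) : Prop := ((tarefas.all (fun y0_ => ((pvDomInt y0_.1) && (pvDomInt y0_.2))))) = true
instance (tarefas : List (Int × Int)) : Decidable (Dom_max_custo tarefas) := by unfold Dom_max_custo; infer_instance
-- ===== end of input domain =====

-- B replaces A's running cumulative-time accumulator with two independent sums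
-- (total deadlines minus position-weighted times) after the same sort; both
-- Pythons sort the argument in place, and the equivalence proved is about the
-- return value (B performs the same mutation).

-- ===== PORT A =====
def max_custo (tarefas : List (Int × Int)) : Int :=
  let sorted := PySem.List.sorted tarefas (fun x => x.2) false
  let st := sorted.foldl
    (fun (st : Int × Int) (p : Int × Int) =>
      (st.1 + p.1, st.2 + (p.2 - (st.1 + p.1)))) ((0 : Int), (0 : Int))
  st.2

-- ===== PORT B =====
def max_custo_alt (tarefas : List (Int × Int)) : Int :=
  let sorted := PySem.List.sorted tarefas (fun x => x.2) false
  let n : Int := sorted.length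
  ((sorted.map (fun p => p.2)).sum)
    - (((PySem.List.enumerate sorted).map (fun p => (n - p.1) * p.2.1)).sum)

-- ===== PRECONDITION & SPEC =====
def Spec_max_custo (tarefas : List (Int × Int)) (out : Int) : Prop := out = max_custo_alt tarefas
instance (tarefas : List (Int × Int)) (out : Int) : Decidable (Spec_max_custo tarefas out) := by unfold Spec_max_custo; infer_instance

-- ===== CLAIM (what is proved, stated in full; the proofs are below) =====
def Claim_equal_max_custo : Prop := ∀ (tarefas : List (Int × Int)), Dom_max_custo tarefas → Spec_max_custo tarefas (max_custo tarefas)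

-- ===== LEMMAS AND PROOFS =====

/-- position-weighted time sum: factor starts at `c` and decreases by one. -/
def pvPW : List (Int × Int) → Int → Int
  | [], _ => 0
  | (t, _) :: r, c => c * t + pvPW r (c - 1)

theorem pvFold_eq (l : List (Int × Int)) : ∀ (ta ct : Int),
    (l.foldl (fun (st : Int × Int) (p : Int × Int) =>
      (st.1 + p.1, st.2 + (p.2 - (st.1 + p.1)))) (ta, ct)).2
      = ct + (l.map (fun p => p.2)).sum - (l.length : Int) * ta - pvPW l (l.length : Int) := by
  induction l with
  | nil => intro ta ct; simp [pvPW]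
  | cons hd tl ih =>
    intro ta ct
    obtain ⟨t, d⟩ := hd
    simp only [List.foldl_cons, List.map_cons, List.sum_cons, List.length_cons, pvPW]
    rw [ih]
    push_cast
    ring

theorem pvEnum_eq (l : List (Int × Int)) : ∀ (s c : Int),
    ((PySem.List.enumerate l s).map (fun p => (c - p.1) * p.2.1)).sum = pvPW l (c - s) := by
  induction l with
  | nil => intro s c; simp [PySem.List.enumerate_nil, pvPW]
  | cons hd tl ih =>
    intro s c
    obtain ⟨t, d⟩ := hd
    rw [PySem.List.enumerate_cons]
    simp only [List.map_cons, List.sum_cons, pvPW, ih]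
    ring_nf

-- ===== VERDICT (by name: the statement is the Claim_ definition above) =====
theorem max_custo_spec : Claim_equal_max_custo := by
  intro tarefas _
  unfold Spec_max_custo max_custo max_custo_alt
  set s := PySem.List.sorted tarefas (fun x => x.2) false with hs
  simp only
  rw [pvFold_eq, pvEnum_eq]
  ring_nf
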